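-- pv_equiv track=rewrite | github.com/PedroJuanSoto/Diagonal-Test | sym_gen_arith_method.py | sym_gen_arith_prog
-- ===== SOURCE A (Python) =====
-- def sym_gen_arith_prog(k):
-- 	D = [1]
-- 	L = [2]
-- 	for i in range(k-1):
-- 		r = 0
-- 		for d in D:
-- 			r += d
-- 		D.append(2*r+1)
-- 		L.append(2)
-- 	return D, L
-- ===== SOURCE B (Python) =====
-- def sym_gen_arith_prog(k):
--     # D is exactly the powers of 3 (2*sum(3^0..3^m)+1 = 3^(m+1)); length is max(k, 1)
--     n = max(k, 1)
--     return [3**i for i in range(n)], [2]*n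
-- ===== Notes on version B (the rewrite author's own statement) =====
-- stated objective: faster
-- what changed: Replaced the loop that re-sums all of D on every iteration with the closed form D[i] = 3**i (since 2*sum(3^0..3^m)+1 = 3^(m+1)) and L = [2]*max(k,1).
import Mathlib
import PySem

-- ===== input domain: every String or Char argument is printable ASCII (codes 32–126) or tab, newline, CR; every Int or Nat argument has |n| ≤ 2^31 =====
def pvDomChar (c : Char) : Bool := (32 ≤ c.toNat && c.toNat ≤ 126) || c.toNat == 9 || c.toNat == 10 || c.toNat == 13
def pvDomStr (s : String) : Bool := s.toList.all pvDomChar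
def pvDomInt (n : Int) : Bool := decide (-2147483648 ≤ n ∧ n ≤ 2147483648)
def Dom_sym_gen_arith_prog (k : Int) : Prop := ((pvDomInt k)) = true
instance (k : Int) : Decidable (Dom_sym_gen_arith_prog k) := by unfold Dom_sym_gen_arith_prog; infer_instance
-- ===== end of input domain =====

-- B replaces A's O(k^2) re-summing loop with the closed form D[i] = 3^i and L = [2]*max(k,1).

-- ===== PORT A =====
-- one iteration of A's for-loop: r = sum of D by inner loop, append 2*r+1 to D and 2 to L
def pvStepA (st : List Int × List Int) (_ : Int) : List Int × List Int :=
  let r := st.1.foldl (fun r d => r + d) 0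
  (st.1 ++ [2 * r + 1], st.2 ++ [2])

def sym_gen_arith_prog (k : Int) : List Int × List Int :=
  (PySem.List.pyRange 0 (k - 1) 1).foldl pvStepA ([1], [2])

-- ===== PORT B =====
def sym_gen_arith_prog_alt (k : Int) : List Int × List Int :=
  let n := max k 1
  ((PySem.List.pyRange 0 n 1).map (fun i => (3 : Int) ^ i.toNat), List.replicate n.toNat 2)

-- ===== PRECONDITION & SPEC =====
def Spec_sym_gen_arith_prog (k : Int) (out : List Int × List Int) : Prop := out = sym_gen_arith_prog_alt k
instance (k : Int) (out : List Int × List Int) : Decidable (Spec_sym_gen_arith_prog k out) := by unfold Spec_sym_gen_arith_prog; infer_instance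

-- ===== CLAIM (what is proved, stated in full; the proofs are below) =====
def Claim_equal_sym_gen_arith_prog : Prop := ∀ (k : Int), Dom_sym_gen_arith_prog k → Spec_sym_gen_arith_prog k (sym_gen_arith_prog k)

-- ===== LEMMAS AND PROOFS =====

-- 2 * (3^0 + ... + 3^(n-1)) + 1 = 3^n (A's inner sum, in A's foldl form)
theorem pv_sum3 (n : Nat) :
    2 * (((List.range n).map (fun i => (3 : Int) ^ i)).foldl (fun r d => r + d) 0) + 1 = 3 ^ n := by
  induction n with
  | zero => simp
  | succ n ih =>
    rw [List.range_succ, List.map_append, List.foldl_append]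
    simp only [List.map_cons, List.map_nil, List.foldl_cons, List.foldl_nil]
    rw [pow_succ]
    linarith

-- one A-step on the closed-form state appends the next power of 3
theorem pv_step_closed (n : Nat) (x : Int) :
    pvStepA ((List.range (n + 1)).map (fun i => (3 : Int) ^ i), List.replicate (n + 1) 2) x
      = ((List.range (n + 2)).map (fun i => (3 : Int) ^ i), List.replicate (n + 2) 2) := by
  have h := pv_sum3 (n + 1)
  simp only [pvStepA, Prod.mk.injEq]
  refine ⟨?_, ?_⟩
  · rw [List.range_succ (n := n + 1), List.map_append]
    simp only [List.map_cons, List.map_nil]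
    rw [h]
  · rw [List.replicate_succ' (n := n + 1)]

-- iterating A's step l.length times from the closed-form state stays in closed form
theorem pv_fold_closed (l : List Int) (n : Nat) :
    l.foldl pvStepA ((List.range (n + 1)).map (fun i => (3 : Int) ^ i), List.replicate (n + 1) 2)
      = ((List.range (l.length + n + 1)).map (fun i => (3 : Int) ^ i),
         List.replicate (l.length + n + 1) 2) := by
  induction l generalizing n with
  | nil => simp
  | cons a l ih =>
    rw [List.foldl_cons, pv_step_closed, show n + 2 = (n + 1) + 1 from rfl, ih (n + 1)]
    have h : l.length + (n + 1) + 1 = (a :: l).length + n + 1 := by simp; omega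
    rw [h]

-- ===== VERDICT (by name: the statement is the Claim_ definition above) =====
theorem sym_gen_arith_prog_spec : Claim_equal_sym_gen_arith_prog := by
  intro k _
  unfold Spec_sym_gen_arith_prog sym_gen_arith_prog sym_gen_arith_prog_alt
  dsimp only
  have h0 : ((List.range (0 + 1)).map (fun i => (3 : Int) ^ i), List.replicate (0 + 1) 2)
      = (([1], [2]) : List Int × List Int) := by decide
  rw [← h0, pv_fold_closed (PySem.List.pyRange 0 (k - 1) 1) 0]
  simp only [PySem.List.length_pyRange_one]
  have hn : (k - 1 - 0).toNat + 0 + 1 = (max k 1).toNat := by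
    rcases le_total k 1 with h | h
    · rw [max_eq_right h]; omega
    · rw [max_eq_left h]; omega
  have hm : (max k 1 - 0).toNat = (max k 1).toNat := by omega
  rw [hn, PySem.List.pyRange_one 0 (max k 1), List.map_map, hm]
  simp only [Prod.mk.injEq]
  refine ⟨?_, trivial⟩
  congr 1
  funext j
  simp
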